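-- pv_equiv track=rewrite | github.com/tropical42/CSC-110 | Assignment 4/assign04_partB.py | greatest_increase
-- ===== SOURCE A (Python) =====
-- def greatest_increase(pop_stats):
--
--     li1 = [] #YEAR LIST
--     li2 = [] #POPULATION LIST
--     li3 = [] #POPULATION-INCREASE LIST
--
--     a = 0
--     b = 1
--     for (x,y) in pop_stats:
--         li1.append(x)
--         li2.append(y)
--
--     for i,j in zip(li2[0:],li2[1:]):
--         li3.append(li2[b]-li2[a])
--         a += 1
--         b += 1
--
--     value1 = li1[li3.index(max(li3))+1]
--     max_value = max(li3)
--
--     return value1, max_value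
-- ===== SOURCE B (Python) =====
-- def greatest_increase(pop_stats):
--     if len(pop_stats) < 2:
--         raise ValueError("need at least two (year, population) entries")
--     it = iter(pop_stats)
--     _, prev_pop = next(it)
--     best_year = None
--     best_inc = None
--     for year, pop in it:
--         inc = pop - prev_pop
--         if best_inc is None or inc > best_inc:
--             best_inc = inc
--             best_year = year
--         prev_pop = pop
--     return best_year, best_inc
-- ===== Notes on version B (the rewrite author's own statement) =====
-- stated objective: simpler
-- what changed: Replaced A's three intermediate lists, manual index counters and the separate max()/.index() rescans with a single pass that tracks the previous population and the first strict-max (year, increase) pair.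
-- outside the precondition, e.g. on greatest_increase([]): A raises ValueError, B raises ValueError; on greatest_increase([(2000, 5)]): A raises ValueError, B raises ValueError
import Mathlib
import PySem

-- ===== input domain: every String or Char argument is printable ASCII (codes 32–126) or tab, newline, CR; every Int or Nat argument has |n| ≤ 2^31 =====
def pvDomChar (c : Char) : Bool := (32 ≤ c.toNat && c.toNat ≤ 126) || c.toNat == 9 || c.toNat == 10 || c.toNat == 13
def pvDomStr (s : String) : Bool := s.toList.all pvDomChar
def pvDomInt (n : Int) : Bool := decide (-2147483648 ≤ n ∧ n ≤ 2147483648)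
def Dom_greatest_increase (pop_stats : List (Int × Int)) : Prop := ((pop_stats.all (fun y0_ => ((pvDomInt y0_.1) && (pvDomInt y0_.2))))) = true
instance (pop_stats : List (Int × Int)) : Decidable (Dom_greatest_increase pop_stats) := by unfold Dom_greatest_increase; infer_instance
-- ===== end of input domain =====

-- B replaces A's three intermediate lists, index counters and the max/.index rescans with
-- one pass that tracks the previous population and the first strict-max (year, increase) pair.

-- ===== PORT A =====
-- A's reads li2[a], li2[b] are always in range while the loop runs; `.getD 0` is the total
-- form of that in-range read (pyGet? is Python-exact, the default is never used).
def greatest_increase (pop_stats : List (Int × Int)) : Int × Int :=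
  let li1 := pop_stats.foldl (fun acc p => acc ++ [p.1]) []
  let li2 := pop_stats.foldl (fun acc p => acc ++ [p.2]) []
  let st := (List.zip (PySem.List.slice li2 (some 0) none) (PySem.List.slice li2 (some 1) none)).foldl
      (fun (st : Int × Int × List Int) _ =>
        (st.1 + 1, st.2.1 + 1,
          st.2.2 ++ [((PySem.List.pyGet? li2 st.2.1).getD 0) - ((PySem.List.pyGet? li2 st.1).getD 0)]))
      (0, 1, ([] : List Int))
  let li3 := st.2.2
  match PySem.List.max? li3 (fun x => x) with
  | none => (0, 0)  -- Python: max([]) raises ValueError here; excluded by Pre_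
  | some m =>
    match PySem.List.index? li3 m with
    | none => (0, 0)  -- unreachable: m is an element of li3
    | some idx => ((PySem.List.pyGet? li1 ((idx : Int) + 1)).getD 0, m)

-- ===== PORT B =====
-- the loop state is (prev_pop, best): best = none while best_inc/best_year are still None;
-- `st.2.elim true (…)` is Python's short-circuit `best_inc is None or inc > best_inc`.
def greatest_increase_alt (pop_stats : List (Int × Int)) : Int × Int :=
  match pop_stats with
  | [] => (0, 0)      -- Python B raises ValueError on fewer than two entries; excluded by Pre_
  | [_] => (0, 0)
  | (_, p0) :: rest =>
    let st := rest.foldl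
      (fun (st : Int × Option (Int × Int)) yp =>
        if st.2.elim true (fun b => decide (b.2 < yp.2 - st.1)) then (yp.2, some (yp.1, yp.2 - st.1))
        else (yp.2, st.2))
      (p0, none)
    match st.2 with
    | some b => b
    | none => (0, 0)  -- unreachable: rest is nonempty here

-- ===== PRECONDITION & SPEC =====
-- Pre_ excludes lists with fewer than two entries, on which A's max([]) raises ValueError
-- (and B raises ValueError as well).
def Pre_greatest_increase (pop_stats : List (Int × Int)) : Prop := 2 ≤ pop_stats.length
instance (pop_stats : List (Int × Int)) : Decidable (Pre_greatest_increase pop_stats) := by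
  unfold Pre_greatest_increase; infer_instance
def pvWitness_greatest_increase : (List (Int × Int)) := [(2000, 10), (2001, 15), (2002, 12)]
def Spec_greatest_increase (pop_stats : List (Int × Int)) (out : Int × Int) : Prop := out = greatest_increase_alt pop_stats
instance (pop_stats : List (Int × Int)) (out : Int × Int) : Decidable (Spec_greatest_increase pop_stats out) := by unfold Spec_greatest_increase; infer_instance

-- ===== CLAIM (what is proved, stated in full; the proofs are below) =====
def Claim_equal_greatest_increase : Prop := ∀ (pop_stats : List (Int × Int)), Dom_greatest_increase pop_stats → Pre_greatest_increase pop_stats → Spec_greatest_increase pop_stats (greatest_increase pop_stats)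

-- ===== LEMMAS AND PROOFS =====

/-- Proof-only: the merging step of a "first strict maximum by second component" left fold
(the same step `PySem.List.max?` uses, with key `Prod.snd`). -/
def pvStepM (acc : Option (Int × Int)) (x : Int × Int) : Option (Int × Int) :=
  match acc with
  | none => some x
  | some m => if m.2 < x.2 then some x else some m

/-- Proof-only: the same merging step on plain integers (key `fun x => x`). -/
def pvStepI (a : Option Int) (v : Int) : Option Int :=
  match a with
  | none => some v
  | some m => if m < v then some v else some m

/-- Proof-only: head-recursive first maximum by second component. -/
def pvFm : List (Int × Int) → Option (Int × Int)
  | [] => none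
  | x :: xs => some (match pvFm xs with | none => x | some b => if x.2 < b.2 then b else x)

/-- Proof-only: consecutive (year, increase) pairs of a (year, population) list. -/
def pvPairs : List (Int × Int) → List (Int × Int)
  | p :: q :: r => (q.1, q.2 - p.2) :: pvPairs (q :: r)
  | _ => []

lemma pv_fold3 (l2 : List Int) : ∀ (m k : Nat) (acc : List Int), l2.length ≤ k + m →
    ((List.zip (l2.drop k) (l2.drop (k + 1))).foldl
      (fun (st : Int × Int × List Int) _ =>
        (st.1 + 1, st.2.1 + 1,
          st.2.2 ++ [((PySem.List.pyGet? l2 st.2.1).getD 0) - ((PySem.List.pyGet? l2 st.1).getD 0)]))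
      ((k : Int), (k : Int) + 1, acc)).2.2
    = acc ++ (List.zip (l2.drop k) (l2.drop (k + 1))).map (fun p => p.2 - p.1) := by
  intro m
  induction m with
  | zero =>
    intro k acc h
    have hd : l2.drop k = [] := List.drop_eq_nil_of_le (by omega)
    simp [hd]
  | succ m ih =>
    intro k acc h
    rcases hdk : l2.drop k with _ | ⟨a, t⟩
    · simp [hdk]
    · rcases ht : t with _ | ⟨b, t'⟩
      · subst ht
        have hdk1 : l2.drop (k + 1) = [] := by
          have h1 : List.drop 1 (List.drop k l2) = List.drop (k + 1) l2 := List.drop_drop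
          rw [← h1, hdk]; rfl
        rw [hdk1]; simp
      · subst ht
        have hdk1 : l2.drop (k + 1) = b :: t' := by
          have h1 : List.drop 1 (List.drop k l2) = List.drop (k + 1) l2 := List.drop_drop
          rw [← h1, hdk]; rfl
        have hdk2 : l2.drop (k + 1 + 1) = t' := by
          have h1 : List.drop 1 (List.drop (k + 1) l2) = List.drop (k + 1 + 1) l2 := List.drop_drop
          rw [← h1, hdk1]; rfl
        have ha : l2[k]? = some a := by
          have h0 : (List.drop k l2)[0]? = l2[k + 0]? := List.getElem?_drop
          rw [hdk] at h0; simpa using h0.symm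
        have hb : l2[k + 1]? = some b := by
          have h0 : (List.drop (k + 1) l2)[0]? = l2[k + 1 + 0]? := List.getElem?_drop
          rw [hdk1] at h0; simpa using h0.symm
        have hga : PySem.List.pyGet? l2 ((k : Int)) = some a := by
          simpa [PySem.List.pyGet?_natCast] using ha
        have hgb : PySem.List.pyGet? l2 ((k : Int) + 1) = some b := by
          have hc : ((k : Int) + 1) = ((k + 1 : Nat) : Int) := by push_cast; ring
          rw [hc, PySem.List.pyGet?_natCast]; exact_mod_cast hb
        rw [hdk1, List.zip_cons_cons, List.foldl_cons, List.map_cons]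
        show (List.foldl _
            ((((k : Int) + 1), (((k : Int) + 1) + 1),
              acc ++ [(PySem.List.pyGet? l2 ((k : Int) + 1)).getD 0 - (PySem.List.pyGet? l2 ((k : Int))).getD 0]) : Int × Int × List Int)
            ((b :: t').zip t')).2.2 = _
        rw [hga, hgb]
        simp only [Option.getD_some]
        rw [show (k : Int) + 1 = ((k + 1 : Nat) : Int) by push_cast; ring]
        have hih := ih (k + 1) (acc ++ [b - a]) (by omega)
        rw [hdk1, hdk2] at hih
        rw [hih]
        simp

lemma pv_pairs_year (a a' p : Int) (r : List (Int × Int)) :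
    pvPairs ((a, p) :: r) = pvPairs ((a', p) :: r) := by
  cases r <;> simp [pvPairs]

lemma pv_pairs_snd (ps : List (Int × Int)) :
    (pvPairs ps).map Prod.snd
      = (List.zip (ps.map Prod.snd) ((ps.map Prod.snd).drop 1)).map (fun p => p.2 - p.1) := by
  induction ps with
  | nil => simp [pvPairs]
  | cons p tail ih =>
    cases tail with
    | nil => simp [pvPairs]
    | cons q r =>
      simp only [pvPairs, List.map_cons, List.drop_succ_cons, List.drop_zero,
        List.zip_cons_cons] at *
      exact congrArg _ ih

lemma pv_pairs_fst (ps : List (Int × Int)) :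
    (pvPairs ps).map Prod.fst = (ps.map Prod.fst).drop 1 := by
  induction ps with
  | nil => simp [pvPairs]
  | cons p tail ih =>
    cases tail with
    | nil => simp [pvPairs]
    | cons q r =>
      simp only [pvPairs, List.map_cons, List.drop_succ_cons, List.drop_zero] at *
      rw [ih]

lemma pv_fm_merge (a x : Int × Int) (xs : List (Int × Int)) :
    pvFm (a :: x :: xs) = pvFm ((if a.2 < x.2 then x else a) :: xs) := by
  rcases h : pvFm xs with _ | e
  · simp [pvFm, h]
  · simp only [pvFm, h]
    split_ifs <;> first | rfl | (exfalso; omega)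

lemma pv_foldM_some : ∀ (xs : List (Int × Int)) (a : Int × Int),
    List.foldl pvStepM (some a) xs = pvFm (a :: xs) := by
  intro xs
  induction xs with
  | nil => intro a; simp [pvFm]
  | cons x xs ih =>
    intro a
    rw [List.foldl_cons]
    have hstep : pvStepM (some a) x = some (if a.2 < x.2 then x else a) := by
      simp only [pvStepM]; split_ifs <;> rfl
    rw [hstep, ih, pv_fm_merge]

lemma pv_foldM_none (dl : List (Int × Int)) :
    List.foldl pvStepM none dl = pvFm dl := by
  cases dl with
  | nil => rfl
  | cons x xs =>
    rw [List.foldl_cons]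
    have h : pvStepM none x = some x := rfl
    rw [h, pv_foldM_some]

lemma pv_max?_eq_fm (dl : List (Int × Int)) : PySem.List.max? dl Prod.snd = pvFm dl := by
  have h0 : PySem.List.max? dl Prod.snd = List.foldl pvStepM none dl := by
    unfold PySem.List.max?
    congr 1
    funext acc x
    cases acc <;> rfl
  rw [h0, pv_foldM_none]

lemma pv_foldI (l : List (Int × Int)) : ∀ (acc : Option (Int × Int)),
    List.foldl pvStepI (acc.map Prod.snd) (l.map Prod.snd)
    = (List.foldl pvStepM acc l).map Prod.snd := by
  induction l with
  | nil => intro acc; rfl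
  | cons x xs ih =>
    intro acc
    rw [List.map_cons, List.foldl_cons, List.foldl_cons]
    have hstep : pvStepI (acc.map Prod.snd) x.2 = (pvStepM acc x).map Prod.snd := by
      cases acc with
      | none => rfl
      | some m =>
        simp only [Option.map_some, pvStepI, pvStepM]
        split_ifs <;> rfl
    rw [hstep, ih]

lemma pv_max?_map_snd (l : List (Int × Int)) :
    PySem.List.max? (l.map Prod.snd) (fun x => x) = (PySem.List.max? l Prod.snd).map Prod.snd := by
  have h1 : PySem.List.max? (l.map Prod.snd) (fun x => x)
      = List.foldl pvStepI none (l.map Prod.snd) := by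
    unfold PySem.List.max?
    congr 1
    funext a v
    cases a <;> rfl
  have h2 : PySem.List.max? l Prod.snd = List.foldl pvStepM none l := by
    unfold PySem.List.max?
    congr 1
    funext a x
    cases a <;> rfl
  rw [h1, h2]
  have h3 := pv_foldI l none
  simpa using h3

lemma pv_main : ∀ (dl : List (Int × Int)), dl ≠ [] → ∃ b i, pvFm dl = some b ∧
    PySem.List.index? (dl.map Prod.snd) b.2 = some i ∧ dl[i]? = some b := by
  intro dl
  induction dl with
  | nil => intro h; exact absurd rfl h
  | cons x xs ih =>
    intro _
    cases xs with
    | nil =>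
      refine ⟨x, 0, by simp [pvFm], ?_, by simp⟩
      rw [List.map_cons]
      exact PySem.List.index?_cons_self _ _
    | cons y r =>
      obtain ⟨b, i, hfm, hidx, hget⟩ := ih (by simp)
      by_cases hx : x.2 < b.2
      · refine ⟨b, i + 1, ?_, ?_, ?_⟩
        · conv_lhs => rw [pvFm, hfm]
          simp [hx]
        · rw [List.map_cons, PySem.List.index?_cons_of_ne _ (by omega : x.2 ≠ b.2), hidx]; rfl
        · simpa using hget
      · refine ⟨x, 0, ?_, ?_, by simp⟩
        · conv_lhs => rw [pvFm, hfm]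
          simp [hx]
        · rw [List.map_cons]
          exact PySem.List.index?_cons_self _ _

lemma pv_LB : ∀ (rest : List (Int × Int)) (p0 : Int) (acc : Option (Int × Int)),
    (rest.foldl
      (fun (st : Int × Option (Int × Int)) yp =>
        if st.2.elim true (fun b => decide (b.2 < yp.2 - st.1)) then (yp.2, some (yp.1, yp.2 - st.1))
        else (yp.2, st.2))
      (p0, acc)).2
    = List.foldl pvStepM acc (pvPairs ((0, p0) :: rest)) := by
  intro rest
  induction rest with
  | nil => intro p0 acc; simp [pvPairs]
  | cons yp r ih =>
    intro p0 acc
    obtain ⟨y, p⟩ := yp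
    have hpp : pvPairs ((0, p0) :: (y, p) :: r) = (y, p - p0) :: pvPairs ((0, p) :: r) := by
      simp only [pvPairs]
      rw [pv_pairs_year y 0 p r]
    rw [hpp, List.foldl_cons, List.foldl_cons]
    cases acc with
    | none => exact ih p (some (y, p - p0))
    | some c =>
      show (List.foldl _
          (if decide (c.2 < p - p0) = true then ((p, some (y, p - p0)) : Int × Option (Int × Int))
           else (p, some c)) r).2 = _
      by_cases hc : c.2 < p - p0
      · rw [if_pos (by simpa using hc)]
        have hM : pvStepM (some c) (y, p - p0) = some (y, p - p0) := by
          simp [pvStepM, hc]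
        rw [hM]
        exact ih p (some (y, p - p0))
      · rw [if_neg (by simpa using hc)]
        have hM : pvStepM (some c) (y, p - p0) = some c := by
          simp [pvStepM, hc]
        rw [hM]
        exact ih p (some c)

-- ===== VERDICT (by name: the statement is the Claim_ definition above) =====
theorem greatest_increase_spec : Claim_equal_greatest_increase := by
  intro ps0 _ hpre
  unfold Spec_greatest_increase
  rcases ps0 with _ | ⟨p, ps'⟩
  · simp [Pre_greatest_increase] at hpre
  rcases ps' with _ | ⟨q, rest⟩
  · simp [Pre_greatest_increase] at hpre
  obtain ⟨py, pp⟩ := p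
  obtain ⟨qy, qp⟩ := q
  obtain ⟨b, i, hfm, hidx, hget⟩ :=
    pv_main (pvPairs ((py, pp) :: (qy, qp) :: rest)) (by simp [pvPairs])
  have hA : greatest_increase ((py, pp) :: (qy, qp) :: rest) = (b.1, b.2) := by
    simp only [greatest_increase]
    rw [PySem.List.foldl_append_singleton_eq_map, PySem.List.foldl_append_singleton_eq_map,
      PySem.List.slice_zero_start, PySem.List.slice_none_none, PySem.List.slice_from_one,
      ← List.drop_one]
    simp only [List.nil_append]
    have hli3 := pv_fold3 (((py, pp) :: (qy, qp) :: rest).map Prod.snd)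
      (((py, pp) :: (qy, qp) :: rest).map Prod.snd).length 0 [] (by omega)
    simp only [List.drop_zero, Nat.cast_zero, zero_add, List.nil_append] at hli3
    rw [hli3, ← pv_pairs_snd]
    rw [pv_max?_map_snd, pv_max?_eq_fm, hfm]
    simp only [Option.map_some]
    simp only [hidx]
    have hli1 : ((((py, pp) :: (qy, qp) :: rest)).map Prod.fst)[i + 1]? = some b.1 := by
      have h1 : ((pvPairs ((py, pp) :: (qy, qp) :: rest)).map Prod.fst)[i]? = some b.1 := by
        rw [List.getElem?_map, hget]; rfl
      rw [pv_pairs_fst] at h1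
      have h2 : (((((py, pp) :: (qy, qp) :: rest)).map Prod.fst).drop 1)[i]?
          = ((((py, pp) :: (qy, qp) :: rest)).map Prod.fst)[1 + i]? := List.getElem?_drop
      rw [h2] at h1
      rwa [Nat.add_comm] at h1
    rw [show ((i : Int) + 1) = ((i + 1 : Nat) : Int) by push_cast; ring,
      PySem.List.pyGet?_natCast, hli1]
    rfl
  have hB : greatest_increase_alt ((py, pp) :: (qy, qp) :: rest) = b := by
    simp only [greatest_increase_alt]
    rw [pv_LB ((qy, qp) :: rest) pp none]
    rw [pv_pairs_year 0 py pp ((qy, qp) :: rest)]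
    rw [pv_foldM_none]
    simp only [hfm]
  rw [hA, hB]
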